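-- pv_equiv track=rewrite | github.com/jeonyujin4209/crypto_ctf | cryptohack/Diffie-Hellman/Misc/The Matrix Revolutions/solve.py | berlekamp_massey_gf2
-- ===== SOURCE A (Python) =====
-- def berlekamp_massey_gf2(s):
--     nn = len(s)
--     C = [1]
--     B = [1]
--     L = 0
--     m = 1
--     for i in range(nn):
--         d = s[i]
--         for j in range(1, len(C)):
--             d ^= C[j] & s[i - j]
--         if d == 0:
--             m += 1
--         elif 2 * L <= i:
--             T = C[:]
--             shift = [0] * m + B
--             while len(shift) < len(C):
--                 shift.append(0)
--             while len(C) < len(shift):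
--                 C.append(0)
--             C = [C[j] ^ shift[j] for j in range(len(C))]
--             L = i + 1 - L
--             B = T
--             m = 1
--         else:
--             shift = [0] * m + B
--             while len(shift) < len(C):
--                 shift.append(0)
--             while len(C) < len(shift):
--                 C.append(0)
--             C = [C[j] ^ shift[j] for j in range(len(C))]
--             m += 1
--     return L, C
-- ===== SOURCE B (Python) =====
-- def berlekamp_massey_gf2(s):
--     # Polynomials C, B as integer bitmasks (bit j = coefficient of x^j),
--     # lengths of the lists A would carry tracked separately in lenC, lenB.
--     C = B = 1
--     lenC = lenB = 1
--     L = 0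
--     m = 1
--     sval = 0  # rolling history: bit j = s[i-1-j] & 1
--     for i, x in enumerate(s):
--         d = x ^ (((C >> 1) & sval).bit_count() & 1)
--         if d == 0:
--             m += 1
--         else:
--             newC, newLen = C ^ (B << m), max(lenC, m + lenB)
--             if 2 * L <= i:
--                 L, B, lenB, m = i + 1 - L, C, lenC, 1
--             else:
--                 m += 1
--             C, lenC = newC, newLen
--         sval = (sval << 1) | (x & 1)
--     return L, [(C >> j) & 1 for j in range(lenC)]
-- ===== Notes on version B (the rewrite author's own statement) =====
-- stated objective: faster
-- what changed: Represents the polynomials C and B as integer bitmasks with separately tracked lengths and keeps a rolling bit-history sval, so the discrepancy becomes one word-level popcount (s[i] ^ (((C>>1)&sval).bit_count() & 1)) instead of A's inner list scan, and A's duplicated pad-and-xor list surgery becomes the single update C ^= B << m.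
import Mathlib
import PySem

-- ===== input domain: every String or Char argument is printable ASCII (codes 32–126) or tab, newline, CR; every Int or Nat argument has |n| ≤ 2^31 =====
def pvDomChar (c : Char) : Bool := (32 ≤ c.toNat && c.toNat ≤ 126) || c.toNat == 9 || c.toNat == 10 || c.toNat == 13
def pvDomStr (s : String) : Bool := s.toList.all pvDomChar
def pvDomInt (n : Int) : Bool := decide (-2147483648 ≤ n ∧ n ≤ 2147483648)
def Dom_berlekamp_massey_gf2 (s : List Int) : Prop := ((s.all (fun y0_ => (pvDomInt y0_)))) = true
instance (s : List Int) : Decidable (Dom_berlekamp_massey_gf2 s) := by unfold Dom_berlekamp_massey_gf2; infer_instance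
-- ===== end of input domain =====

-- B replaces A's coefficient lists by integer bitmasks with separately tracked lengths and a
-- rolling bit-history, computing each discrepancy by one popcount instead of an inner list scan.

-- ===== PORT A =====
-- "while len(l) < n: l.append(0)" — pad l with zeros up to length n
def pad (l : List Int) (n : Nat) : List Int := l ++ List.replicate (n - l.length) 0

-- one iteration of A's "for i in range(nn)" loop; state (C, B, L, m)
def bmA_step (s : List Int) (st : List Int × List Int × Int × Int) (i : Int) :
    List Int × List Int × Int × Int :=
  let C := st.1
  let B := st.2.1
  let L := st.2.2.1
  let m := st.2.2.2
  let d := (PySem.List.pyRange 1 (C.length : Int) 1).foldl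
      (fun d j => PySem.Int.bxor d (PySem.Int.band (PySem.List.pyGetD C j 0) (PySem.List.pyGetD s (i - j) 0)))
      (PySem.List.pyGetD s i 0)
  if d = 0 then
    (C, B, L, m + 1)
  else
    let T := C
    let shift := pad (List.replicate m.toNat 0 ++ B) C.length
    let C2 := pad C shift.length
    let Cn := (PySem.List.pyRange 0 (C2.length : Int) 1).map
        (fun j => PySem.Int.bxor (PySem.List.pyGetD C2 j 0) (PySem.List.pyGetD shift j 0))
    if 2 * L ≤ i then (Cn, T, i + 1 - L, 1)
    else (Cn, B, L, m + 1)

def berlekamp_massey_gf2 (s : List Int) : Int × List Int :=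
  let st := (PySem.List.pyRange 0 (s.length : Int) 1).foldl (bmA_step s) ([1], [1], 0, 1)
  (st.2.2.1, st.1)

-- ===== PORT B =====
-- ((x).bit_count() & 1) of a nonnegative Python int, carried as Nat
def natParity (x : Nat) : Nat := PySem.Int.bitCount (x : Int) % 2

-- one iteration of B's "for i, x in enumerate(s)" loop; state (C, lenC, B, lenB, L, m, sval, i).
-- Source B's C, B, sval, lenC, lenB, m, i are nonnegative Python ints throughout (they start at 0/1
-- and are only xored, shifted, or-ed, maxed or incremented), so they are carried as Nat — the
-- Nat operations ^^^/<<</||| agree with Python's on these values; ((x & 1)).toNat is exact since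
-- x & 1 ∈ {0,1}.  L is returned, so it stays Int.
def bmB_step (st : Nat × Nat × Nat × Nat × Int × Nat × Nat × Nat) (x : Int) :
    Nat × Nat × Nat × Nat × Int × Nat × Nat × Nat :=
  let c := st.1
  let lc := st.2.1
  let b := st.2.2.1
  let lb := st.2.2.2.1
  let L := st.2.2.2.2.1
  let m := st.2.2.2.2.2.1
  let sv := st.2.2.2.2.2.2.1
  let i := st.2.2.2.2.2.2.2
  let d := PySem.Int.bxor x ((natParity ((c >>> 1) &&& sv) : Nat) : Int)
  let sv' := (sv <<< 1) ||| (PySem.Int.band x 1).toNat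
  if d = 0 then
    (c, lc, b, lb, L, m + 1, sv', i + 1)
  else
    let c' := c ^^^ (b <<< m)
    let n' := max lc (m + lb)
    if 2 * L ≤ (i : Int) then (c', n', c, lc, (i : Int) + 1 - L, 1, sv', i + 1)
    else (c', n', b, lb, L, m + 1, sv', i + 1)

def berlekamp_massey_gf2_alt (s : List Int) : Int × List Int :=
  let r := s.foldl bmB_step (1, 1, 1, 1, 0, 1, 0, 0)
  -- return L, [(C >> j) & 1 for j in range(lenC)]
  (r.2.2.2.2.1, (List.range r.2.1).map (fun j => (((r.1 >>> j) &&& 1 : Nat) : Int)))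

-- ===== PRECONDITION & SPEC =====
def Spec_berlekamp_massey_gf2 (s : List Int) (out : Int × List Int) : Prop := out = berlekamp_massey_gf2_alt s
instance (s : List Int) (out : Int × List Int) : Decidable (Spec_berlekamp_massey_gf2 s out) := by unfold Spec_berlekamp_massey_gf2; infer_instance

-- ===== CLAIM (what is proved, stated in full; the proofs are below) =====
def Claim_equal_berlekamp_massey_gf2 : Prop := ∀ (s : List Int), Dom_berlekamp_massey_gf2 s → Spec_berlekamp_massey_gf2 s (berlekamp_massey_gf2 s)

-- ===== LEMMAS AND PROOFS =====

-- the list A carries, read off from B's bitmask c and tracked length n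
def bitsL (c n : Nat) : List Int := (List.range n).map (fun j => (((c >>> j) &&& 1 : Nat) : Int))

-- the low bit of a Python int, as a Nat in {0,1}
def bitI (x : Int) : Nat := (PySem.Int.band x 1).toNat

-- bit j of a Nat, as a Nat in {0,1}
def bitn (x j : Nat) : Nat := if x.testBit j then 1 else 0

-- B's rolling history after i steps: bit j = s[i-1-j] & 1
def svalOf (s : List Int) : Nat → Nat
  | 0 => 0
  | i + 1 => (svalOf s i <<< 1) ||| bitI (s.getD i 0)

-- A's state as the image of B's state
def absSt (r : Nat × Nat × Nat × Nat × Int × Nat × Nat × Nat) : List Int × List Int × Int × Int :=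
  (bitsL r.1 r.2.1, bitsL r.2.2.1 r.2.2.2.1, r.2.2.2.2.1, (r.2.2.2.2.2.1 : Int))

theorem bitsL_length (c n : Nat) : (bitsL c n).length = n := by simp [bitsL]

theorem bitI_lt (x : Int) : bitI x < 2 := by
  unfold bitI
  rw [PySem.Int.band_one]
  have h1 := PySem.Int.mod_nonneg x (b := 2) (by norm_num)
  have h2 := PySem.Int.mod_lt x (b := 2) (by norm_num)
  omega

theorem bitI_cast (x : Int) : ((bitI x : Nat) : Int) = PySem.Int.band x 1 := by
  unfold bitI
  rw [PySem.Int.band_one]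
  exact Int.toNat_of_nonneg (PySem.Int.mod_nonneg x (b := 2) (by norm_num))

theorem bxor_assoc_cast (x : Int) (u v : Nat) :
    PySem.Int.bxor (PySem.Int.bxor x (u : Int)) (v : Int) = PySem.Int.bxor x ((u ^^^ v : Nat) : Int) := by
  have hu : (0:Int) ≤ (u:Int) := Int.natCast_nonneg u
  have hv : (0:Int) ≤ (v:Int) := Int.natCast_nonneg v
  have huv : (0:Int) ≤ ((u ^^^ v : Nat):Int) := Int.natCast_nonneg _
  by_cases hx : 0 ≤ x
  · rw [PySem.Int.bxor_of_nonneg hx hu, PySem.Int.bxor_of_nonneg (Int.natCast_nonneg _) hv,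
      PySem.Int.bxor_of_nonneg hx huv]
    simp [Nat.xor_assoc]
  · rw [PySem.Int.bxor.eq_1 x (u:Int), if_neg hx, if_pos hu]
    have hw : (0:Int) ≤ (((-x - 1).toNat ^^^ u : Nat) : Int) := Int.natCast_nonneg _
    rw [Int.toNat_natCast]
    rw [PySem.Int.bxor.eq_1 (-(((-x - 1).toNat ^^^ u : Nat) : Int) - 1) (v:Int),
      if_neg (by omega), if_pos hv, Int.toNat_natCast]
    rw [PySem.Int.bxor.eq_1 x ((u ^^^ v : Nat):Int), if_neg hx, if_pos huv]
    have h2 : (-(-(((-x - 1).toNat ^^^ u : Nat) : Int) - 1) - 1).toNat = (-x - 1).toNat ^^^ u := by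
      omega
    rw [h2]
    simp [Nat.xor_assoc]

theorem nat_foldl_xor_out {α : Type} (g : α → Nat) (l : List α) (y : Nat) :
    l.foldl (fun a t => a ^^^ g t) y = y ^^^ l.foldl (fun a t => a ^^^ g t) 0 := by
  induction l generalizing y with
  | nil => simp
  | cons a l ih => simp only [List.foldl_cons]; rw [ih, ih (0 ^^^ g a)]; simp [Nat.xor_assoc]

theorem foldl_bxor_out {α : Type} (g : α → Nat) (l : List α) (x : Int) :
    l.foldl (fun d t => PySem.Int.bxor d ((g t : Nat) : Int)) x
      = PySem.Int.bxor x ((l.foldl (fun a t => a ^^^ g t) 0 : Nat) : Int) := by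
  induction l generalizing x with
  | nil => simp [PySem.Int.bxor_zero]
  | cons a l ih =>
      simp only [List.foldl_cons]
      rw [ih, nat_foldl_xor_out g l (0 ^^^ g a), Nat.zero_xor, bxor_assoc_cast]

theorem bitn_eq_shift (x j : Nat) : (x >>> j) &&& 1 = bitn x j := by
  unfold bitn
  rw [Nat.and_one_is_mod, Nat.shiftRight_eq_div_pow, Nat.testBit_eq_decide_div_mod_eq]
  by_cases h : x / 2 ^ j % 2 = 1
  · simp [h]
  · simp [h]; omega

theorem natParity_zero : natParity 0 = 0 := by
  simp [natParity, PySem.Int.bitCount_zero]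

theorem natParity_rec (x : Nat) (hx : 0 < x) : natParity x = (x % 2) ^^^ natParity (x / 2) := by
  show PySem.Int.bitCount (x : Int) % 2 = _
  rw [PySem.Int.bitCount_natCast hx]
  show (x % 2 + PySem.Int.bitCount ((x / 2 : Nat) : Int)) % 2
      = x % 2 ^^^ PySem.Int.bitCount ((x / 2 : Nat) : Int) % 2
  rcases Nat.mod_two_eq_zero_or_one x with h | h <;>
    rcases Nat.mod_two_eq_zero_or_one (PySem.Int.bitCount ((x / 2 : Nat) : Int)) with h2 | h2 <;>
    (rw [Nat.add_mod, h, h2]; decide)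

theorem natParity_eq_fold : ∀ (n x : Nat), x < 2 ^ n →
    natParity x = (List.range n).foldl (fun a j => a ^^^ bitn x j) 0 := by
  intro n
  induction n with
  | zero => intro x hx; interval_cases x; simp [natParity_zero]
  | succ n ih =>
      intro x hx
      rw [List.range_succ_eq_map, List.foldl_cons, List.foldl_map]
      have hb : ∀ j, bitn x (j + 1) = bitn (x / 2) j := by
        intro j; unfold bitn; rw [Nat.testBit_add_one]
      calc natParity x = (x % 2) ^^^ natParity (x / 2) := by
            rcases Nat.eq_zero_or_pos x with h | h
            · simp [h, natParity_zero]
            · exact natParity_rec x h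
        _ = (0 ^^^ bitn x 0) ^^^ natParity (x / 2) := by
            unfold bitn; rw [Nat.zero_xor, Nat.testBit_zero]
            rcases Nat.mod_two_eq_zero_or_one x with h | h <;> simp [h]
        _ = _ := by
            rw [ih (x / 2) (by omega),
              nat_foldl_xor_out (fun j => bitn x j.succ) (List.range n) (0 ^^^ bitn x 0)]
            simp only [Nat.zero_xor]
            congr 1
            apply PySem.List.foldl_congr_mem
            intro a j _
            rw [Nat.succ_eq_add_one, hb]

theorem svalOf_testBit (s : List Int) (i j : Nat) :
    (svalOf s i).testBit j = (decide (j < i) && (bitI (s.getD (i - 1 - j) 0) == 1)) := by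
  induction i generalizing j with
  | zero => simp [svalOf]
  | succ i ih =>
      show ((svalOf s i <<< 1) ||| bitI (s.getD i 0)).testBit j = _
      rw [Nat.testBit_or, Nat.testBit_shiftLeft]
      cases j with
      | zero =>
          have hb := bitI_lt (s.getD i 0)
          simp only [ge_iff_le]
          have : (bitI (s.getD i 0)).testBit 0 = ((bitI (s.getD i 0)) == 1) := by
            interval_cases h : bitI (s.getD i 0) <;> decide
          rw [this]
          simp
      | succ j =>
          have hb := bitI_lt (s.getD i 0)
          have h2 : (bitI (s.getD i 0)).testBit (j + 1) = false := by
            apply Nat.testBit_eq_false_of_lt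
            calc bitI (s.getD i 0) < 2 := hb
              _ ≤ 2 ^ (j + 1) := by
                have := Nat.one_le_two_pow (n := j)
                calc (2:Nat) = 2 * 1 := rfl
                  _ ≤ 2 * 2 ^ j := by omega
                  _ = 2 ^ (j + 1) := (Nat.pow_succ' ..).symm
          rw [h2, Bool.or_false]
          simp only [ge_iff_le, Nat.le_add_left 1 j, decide_true, Bool.true_and,
            Nat.add_sub_cancel]
          rw [ih j]
          have h3 : i - 1 - j = i - (j + 1) := by omega
          have h4 : decide (j < i) = decide (j + 1 < i + 1) := by simp
          rw [h3, h4]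

theorem disc_eq (s : List Int) (i c lc : Nat) (hc : c < 2 ^ lc) (h1 : 1 ≤ lc)
    (hlc : lc ≤ i + 1) :
    (PySem.List.pyRange 1 ((bitsL c lc).length : Int) 1).foldl
      (fun d j => PySem.Int.bxor d (PySem.Int.band (PySem.List.pyGetD (bitsL c lc) j 0) (PySem.List.pyGetD s ((i : Int) - j) 0)))
      (PySem.List.pyGetD s (i : Int) 0)
    = PySem.Int.bxor (s.getD i 0) ((natParity ((c >>> 1) &&& svalOf s i) : Nat) : Int) := by
  rw [bitsL_length, PySem.List.pyRange_one, PySem.List.pyGetD_natCast]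
  have hn : (((lc:Int)) - 1).toNat = lc - 1 := by omega
  rw [hn, List.foldl_map]
  have hstep : ∀ (d : Int), ∀ k ∈ List.range (lc - 1),
      PySem.Int.bxor d
          (PySem.Int.band (PySem.List.pyGetD (bitsL c lc) (1 + (k:Int)) 0)
            (PySem.List.pyGetD s ((i:Int) - (1 + (k:Int))) 0))
        = PySem.Int.bxor d (((if c.testBit (k+1) then bitI (s.getD (i - 1 - k) 0) else 0 : Nat)) : Int) := by
    intro d k hk
    rw [List.mem_range] at hk
    have hki : k + 1 ≤ i := by omega
    have e1 : (1 + (k:Int)) = ((k + 1 : Nat) : Int) := by push_cast; ring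
    have e2 : (i:Int) - ((k + 1 : Nat) : Int) = ((i - (k+1) : Nat) : Int) := by omega
    rw [e1, e2, PySem.List.pyGetD_natCast, PySem.List.pyGetD_natCast]
    have e3 : (bitsL c lc).getD (k+1) 0 = (((c >>> (k+1)) &&& 1 : Nat) : Int) := by
      have hk1 : k + 1 < lc := by omega
      simp [bitsL, List.getD, hk1]
    rw [e3, bitn_eq_shift]
    by_cases hb : c.testBit (k+1)
    · simp only [bitn, if_pos hb]
      rw [PySem.Int.band_comm]
      have hix : i - (k+1) = i - 1 - k := by omega
      have : PySem.Int.band (s.getD (i - (k+1)) 0) (((1:Nat)):Int) = ((bitI (s.getD (i - 1 - k) 0) : Nat) : Int) := by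
        rw [hix, bitI_cast]; norm_num
      rw [this]
    · simp only [bitn, if_neg hb]
      rw [show (((0:Nat)):Int) = 0 by norm_num, PySem.Int.band_comm, PySem.Int.band_zero]
  rw [PySem.List.foldl_congr_mem _ _ _ _ hstep]
  rw [foldl_bxor_out]
  congr 1
  have hmask : (c >>> 1) &&& svalOf s i < 2 ^ (lc - 1) := by
    have h2 : c >>> 1 < 2 ^ (lc - 1) := by
      rw [Nat.shiftRight_eq_div_pow]
      have e : 2 ^ lc = 2 ^ (lc - 1) * 2 := by
        rw [← Nat.pow_succ]; congr 1; omega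
      rw [Nat.div_lt_iff_lt_mul (by norm_num), ← e]
      simpa using hc
    exact lt_of_le_of_lt (Nat.and_le_left) h2
  rw [natParity_eq_fold (lc - 1) _ hmask]
  congr 1
  apply PySem.List.foldl_congr_mem
  intro a j hj
  rw [List.mem_range] at hj
  congr 1
  unfold bitn
  rw [Nat.testBit_and, Nat.testBit_shiftRight, svalOf_testBit]
  have hji : j < i := by omega
  simp only [hji, decide_true, Bool.true_and]
  have hbl := bitI_lt (s.getD (i - 1 - j) 0)
  by_cases hb : c.testBit (1 + j)
  · rw [show 1 + j = j + 1 by omega] at hb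
    simp only [show 1 + j = j + 1 by omega, hb, Bool.true_and, if_pos]
    interval_cases h : bitI (s.getD (i - 1 - j) 0) <;> simp
  · rw [show 1 + j = j + 1 by omega] at hb
    simp [show 1 + j = j + 1 by omega, hb]

theorem getD_bitsL (c n k : Nat) (h : k < n) : (bitsL c n).getD k 0 = ((bitn c k : Nat) : Int) := by
  rw [List.getD_eq_getElem?_getD]
  unfold bitsL
  rw [List.getElem?_map, List.getElem?_range h]
  simp only [Option.map_some, Option.getD_some]
  rw [bitn_eq_shift]

theorem bitn_hi (x n k : Nat) (hx : x < 2 ^ n) (h : n ≤ k) : bitn x k = 0 := by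
  unfold bitn
  rw [Nat.testBit_eq_false_of_lt (lt_of_lt_of_le hx (Nat.pow_le_pow_right (by norm_num) h))]
  rfl

theorem bitn_xor (x y j : Nat) : bitn (x ^^^ y) j = bitn x j ^^^ bitn y j := by
  unfold bitn
  rw [Nat.testBit_xor]
  cases hx : x.testBit j <;> cases hy : y.testBit j <;> rfl

theorem pad_length (l : List Int) (n : Nat) : (pad l n).length = max l.length n := by
  simp [pad]; omega

theorem getD_pad_bitsL (c lc n k : Nat) (hc : c < 2 ^ lc) :
    (pad (bitsL c lc) n).getD k 0 = ((bitn c k : Nat) : Int) := by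
  rw [List.getD_eq_getElem?_getD]
  by_cases h : k < lc
  · rw [pad, List.getElem?_append_left (by simpa [bitsL_length] using h),
      ← List.getD_eq_getElem?_getD, getD_bitsL c lc k h]
  · rw [bitn_hi c lc k hc (by omega)]
    rcases h3 : (pad (bitsL c lc) n)[k]? with _ | v
    · rfl
    · obtain ⟨hklt, hv2⟩ := List.getElem?_eq_some_iff.mp h3
      unfold pad at hv2
      rw [List.getElem_append_right (by rw [bitsL_length]; omega)] at hv2
      simp at hv2
      simp [← hv2]

theorem getD_pad_shift (b lb m n k : Nat) (hb : b < 2 ^ lb) :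
    (pad (List.replicate m (0:Int) ++ bitsL b lb) n).getD k 0 = ((bitn (b <<< m) k : Nat) : Int) := by
  have hbs : bitn (b <<< m) k = if m ≤ k then bitn b (k - m) else 0 := by
    unfold bitn
    rw [Nat.testBit_shiftLeft]
    by_cases h : m ≤ k <;> simp [h, ge_iff_le]
  rw [List.getD_eq_getElem?_getD]
  by_cases h1 : k < m
  · rw [pad, List.getElem?_append_left (by simp [bitsL_length]; omega),
      List.getElem?_append_left (by simp; omega)]
    rw [hbs, if_neg (by omega)]
    simp
  · by_cases h2 : k < m + lb
    · rw [pad, List.getElem?_append_left (by simp [bitsL_length]; omega),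
        List.getElem?_append_right (by simp; omega)]
      simp only [List.length_replicate]
      rw [← List.getD_eq_getElem?_getD, getD_bitsL b lb (k - m) (by omega), hbs, if_pos (by omega)]
    · rw [hbs, if_pos (by omega), bitn_hi b lb (k - m) hb (by omega)]
      rcases h3 : (pad (List.replicate m (0:Int) ++ bitsL b lb) n)[k]? with _ | v
      · rfl
      · obtain ⟨hklt, hv2⟩ := List.getElem?_eq_some_iff.mp h3
        unfold pad at hv2
        by_cases h4 : k < m + lb + (n - (m + lb))
        · rw [List.getElem_append_right (by simp [bitsL_length]; omega)] at hv2
          simp at hv2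
          simp [← hv2]
        · exfalso
          rw [pad_length] at hklt
          simp [bitsL_length] at hklt
          omega

theorem upd_eq (c lc b lb m : Nat) (hc : c < 2 ^ lc) (hb : b < 2 ^ lb) :
    (PySem.List.pyRange 0 ((pad (bitsL c lc) (pad (List.replicate m (0:Int) ++ bitsL b lb) lc).length).length : Int) 1).map
        (fun j => PySem.Int.bxor
          (PySem.List.pyGetD (pad (bitsL c lc) (pad (List.replicate m (0:Int) ++ bitsL b lb) lc).length) j 0)
          (PySem.List.pyGetD (pad (List.replicate m (0:Int) ++ bitsL b lb) lc) j 0))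
    = bitsL (c ^^^ (b <<< m)) (max lc (m + lb)) := by
  have hslen : (pad (List.replicate m (0:Int) ++ bitsL b lb) lc).length = max lc (m + lb) := by
    rw [pad_length]; simp [bitsL_length]; omega
  have hclen : (pad (bitsL c lc) (pad (List.replicate m (0:Int) ++ bitsL b lb) lc).length).length
      = max lc (m + lb) := by
    rw [pad_length, hslen, bitsL_length]; omega
  rw [hclen, PySem.List.pyRange_one]
  have e : (((max lc (m + lb) : Nat) : Int) - 0).toNat = max lc (m + lb) := by omega
  rw [e, List.map_map]
  conv_rhs => unfold bitsL
  apply List.map_congr_left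
  intro k hk
  rw [List.mem_range] at hk
  simp only [Function.comp_apply]
  have e0 : (0 : Int) + (k : Int) = ((k : Nat) : Int) := by omega
  rw [e0, PySem.List.pyGetD_natCast, PySem.List.pyGetD_natCast,
    getD_pad_bitsL c lc _ k hc, getD_pad_shift b lb m lc k hb,
    PySem.Int.bxor_natCast, bitn_eq_shift, bitn_xor]

theorem sim (s : List Int) : ∀ (t : List Int) (i c lc b lb : Nat) (L : Int) (m : Nat),
    s.drop i = t → i + t.length = s.length →
    c < 2 ^ lc → b < 2 ^ lb → 1 ≤ lc → lc ≤ i + 1 → m + lb ≤ i + 2 →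
    (List.range' i t.length).foldl (fun st (k : Nat) => bmA_step s st (k : Int))
        (bitsL c lc, bitsL b lb, L, (m : Int))
      = absSt (t.foldl bmB_step (c, lc, b, lb, L, m, svalOf s i, i)) := by
  intro t
  induction t with
  | nil =>
      intro i c lc b lb L m _ _ _ _ _ _ _
      simp [absSt]
  | cons x t ih =>
      intro i c lc b lb L m hdrop hlen hc hb h1 hlc hm
      have hi : i < s.length := by
        have := congrArg List.length hdrop
        simp at this
        omega
      have hx : s[i] = x := by
        have h0 : (s.drop i)[0]'(by rw [hdrop]; simp) = x := by
          simp [hdrop]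
        rwa [List.getElem_drop] at h0
      have hxd : s.getD i 0 = x := by
        rw [List.getD_eq_getElem?_getD, List.getElem?_eq_getElem hi, hx]
        rfl
      have hdrop' : s.drop (i + 1) = t := by
        have := congrArg List.tail hdrop
        rwa [List.tail_drop] at this
      have hsv : ((svalOf s i <<< 1) ||| (PySem.Int.band x 1).toNat) = svalOf s (i + 1) := by
        show _ = (svalOf s i <<< 1) ||| bitI (s.getD i 0)
        rw [hxd]
        rfl
      rw [List.length_cons, List.range'_succ, List.foldl_cons, List.foldl_cons]
      have hdisc : (PySem.List.pyRange 1 ((bitsL c lc).length : Int) 1).foldl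
            (fun d j => PySem.Int.bxor d (PySem.Int.band (PySem.List.pyGetD (bitsL c lc) j 0)
              (PySem.List.pyGetD s ((i : Int) - j) 0)))
            (PySem.List.pyGetD s (i : Int) 0)
          = PySem.Int.bxor x ((natParity ((c >>> 1) &&& svalOf s i) : Nat) : Int) := by
        rw [disc_eq s i c lc hc h1 hlc, hxd]
      set D := PySem.Int.bxor x ((natParity ((c >>> 1) &&& svalOf s i) : Nat) : Int) with hD
      by_cases hd0 : D = 0
      · have hA : bmA_step s (bitsL c lc, bitsL b lb, L, (m : Int)) (i : Int)
            = (bitsL c lc, bitsL b lb, L, ((m + 1 : Nat) : Int)) := by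
          simp only [bmA_step]
          rw [hdisc, if_pos hd0]
          norm_num
        have hB : bmB_step (c, lc, b, lb, L, m, svalOf s i, i) x
            = (c, lc, b, lb, L, m + 1, svalOf s (i + 1), i + 1) := by
          simp only [bmB_step]
          rw [← hD, if_pos hd0, hsv]
        rw [hA, hB, ih (i+1) c lc b lb L (m+1) hdrop' (by simp at hlen ⊢; omega) hc hb h1
          (by omega) (by omega)]
      · have hc' : c ^^^ (b <<< m) < 2 ^ (max lc (m + lb)) := by
          apply Nat.xor_lt_two_pow
          · exact lt_of_lt_of_le hc (Nat.pow_le_pow_right (by norm_num) (by omega))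
          · rw [Nat.shiftLeft_eq]
            calc b * 2 ^ m < 2 ^ lb * 2 ^ m := by
                  have := Nat.one_le_two_pow (n := m)
                  exact Nat.mul_lt_mul_of_lt_of_le hb (le_refl _) (by omega)
              _ = 2 ^ (lb + m) := by rw [← Nat.pow_add]
              _ ≤ 2 ^ (max lc (m + lb)) := Nat.pow_le_pow_right (by norm_num) (by omega)
        have hupd : (PySem.List.pyRange 0
              (((pad (bitsL c lc) ((pad (List.replicate ((m:Int)).toNat 0 ++ bitsL b lb) (bitsL c lc).length).length)).length : Int)) 1).map
            (fun j => PySem.Int.bxor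
              (PySem.List.pyGetD (pad (bitsL c lc) ((pad (List.replicate ((m:Int)).toNat 0 ++ bitsL b lb) (bitsL c lc).length).length)) j 0)
              (PySem.List.pyGetD (pad (List.replicate ((m:Int)).toNat 0 ++ bitsL b lb) (bitsL c lc).length) j 0))
            = bitsL (c ^^^ (b <<< m)) (max lc (m + lb)) := by
          rw [Int.toNat_natCast, bitsL_length]
          exact upd_eq c lc b lb m hc hb
        by_cases hcond : 2 * L ≤ (i : Int)
        · have hA : bmA_step s (bitsL c lc, bitsL b lb, L, (m : Int)) (i : Int)
              = (bitsL (c ^^^ (b <<< m)) (max lc (m + lb)), bitsL c lc, (i : Int) + 1 - L,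
                  ((1 : Nat) : Int)) := by
            simp only [bmA_step]
            rw [hdisc, if_neg hd0, hupd, if_pos hcond]
            norm_num
          have hB : bmB_step (c, lc, b, lb, L, m, svalOf s i, i) x
              = (c ^^^ (b <<< m), max lc (m + lb), c, lc, (i : Int) + 1 - L, 1,
                  svalOf s (i + 1), i + 1) := by
            simp only [bmB_step]
            rw [← hD, if_neg hd0, hsv, if_pos hcond]
          rw [hA, hB, ih (i+1) (c ^^^ (b <<< m)) (max lc (m+lb)) c lc ((i:Int) + 1 - L) 1 hdrop'
            (by simp at hlen ⊢; omega) hc' hc (by omega) (by omega) (by omega)]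
        · have hA : bmA_step s (bitsL c lc, bitsL b lb, L, (m : Int)) (i : Int)
              = (bitsL (c ^^^ (b <<< m)) (max lc (m + lb)), bitsL b lb, L,
                  ((m + 1 : Nat) : Int)) := by
            simp only [bmA_step]
            rw [hdisc, if_neg hd0, hupd, if_neg hcond]
            norm_num
          have hB : bmB_step (c, lc, b, lb, L, m, svalOf s i, i) x
              = (c ^^^ (b <<< m), max lc (m + lb), b, lb, L, m + 1,
                  svalOf s (i + 1), i + 1) := by
            simp only [bmB_step]
            rw [← hD, if_neg hd0, hsv, if_neg hcond]
          rw [hA, hB, ih (i+1) (c ^^^ (b <<< m)) (max lc (m+lb)) b lb L (m+1) hdrop'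
            (by simp at hlen ⊢; omega) hc' hb (by omega) (by omega) (by omega)]

-- ===== VERDICT (by name: the statement is the Claim_ definition above) =====
theorem berlekamp_massey_gf2_spec : Claim_equal_berlekamp_massey_gf2 := by
  intro s _
  unfold Spec_berlekamp_massey_gf2
  simp only [berlekamp_massey_gf2, berlekamp_massey_gf2_alt]
  rw [PySem.List.pyRange_one]
  have e : (((s.length : Int)) - 0).toNat = s.length := by omega
  rw [e, List.foldl_map]
  simp only [zero_add]
  have hinit : (([(1:Int)], [(1:Int)], (0:Int), (1:Int)) : List Int × List Int × Int × Int)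
      = (bitsL 1 1, bitsL 1 1, (0:Int), ((1:Nat) : Int)) := by decide
  rw [hinit, List.range_eq_range']
  have hsim := sim s s 0 1 1 1 1 0 1 rfl (by simp) (by decide) (by decide) (by omega) (by omega)
    (by omega)
  rw [show svalOf s 0 = 0 from rfl] at hsim
  rw [hsim]
  rfl
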